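-- pv_equiv track=rewrite | github.com/AGilsoul/PyMath | py_math.py | poly_simplify
-- ===== SOURCE A (Python) =====
-- def poly_simplify(coefs, powers):
--     simp_coefs = []
--     simp_powers = []
--     excluded_indices = []
--     changes = -1
--     while changes != 0:
--         changes = 1
--         simp_coefs = []
--         simp_powers = []
--
--         excluded_indices = []
--         for p1 in range(len(powers)):
--             if p1 not in excluded_indices:
--                 duplicate_coefs = [coefs[p1]]
--                 for p2 in range(p1 + 1, len(powers)):
--                     if powers[p1] == powers[p2]:
--                         excluded_indices.append(p2)
--                         duplicate_coefs.append(coefs[p2])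
--                         changes += 1
--
--                 simp_powers.append(powers[p1])
--                 simp_coefs.append(sum(duplicate_coefs))
--         powers = simp_powers
--         coefs = simp_coefs
--         changes -= 1
--     c = 0
--     while c < len(simp_coefs):
--         if simp_coefs[c] == 0:
--             del simp_coefs[c]
--             del simp_powers[c]
--         else:
--             c += 1
--     if len(simp_coefs) != 0:
--         simp_powers, simp_coefs = [list(x) for x in zip(*sorted(zip(simp_powers, simp_coefs), reverse=True))]
--     return simp_coefs, simp_powers
-- ===== SOURCE B (Python) =====
-- def poly_simplify(coefs, powers):
--     agg = {}
--     for c, p in zip(coefs, powers):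
--         agg[p] = agg.get(p, 0) + c
--     items = [(p, c) for p, c in agg.items() if c != 0]
--     items.sort(reverse=True)
--     return [c for _, c in items], [p for p, _ in items]
-- ===== Notes on version B (the rewrite author's own statement) =====
-- stated objective: faster
-- what changed: Replaced the quadratic fixed-point loop with excluded-index rescans by a single dict aggregation of coefficients keyed by power, then one zero-filter and one sort.
import Mathlib
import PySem

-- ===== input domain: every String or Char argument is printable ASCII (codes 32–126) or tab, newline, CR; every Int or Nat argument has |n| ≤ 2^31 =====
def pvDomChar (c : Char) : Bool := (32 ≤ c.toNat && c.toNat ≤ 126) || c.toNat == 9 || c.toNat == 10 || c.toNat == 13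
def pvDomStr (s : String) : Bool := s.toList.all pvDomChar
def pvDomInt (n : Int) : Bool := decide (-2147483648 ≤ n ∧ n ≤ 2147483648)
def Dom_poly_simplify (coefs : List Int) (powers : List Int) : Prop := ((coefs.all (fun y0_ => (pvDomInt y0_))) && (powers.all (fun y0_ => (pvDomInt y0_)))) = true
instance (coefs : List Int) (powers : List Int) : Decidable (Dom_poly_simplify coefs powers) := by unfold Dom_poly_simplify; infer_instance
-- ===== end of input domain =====

-- B replaces A's quadratic fixed-point rescan by one dict aggregation keyed by power, a zero
-- filter and a single sort; return values agree on Pre_ (powers no longer than coefs).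

-- ===== PORT A =====
-- one body of A's `while` loop: the nested index scans with excluded_indices;
-- returns (simp_coefs, simp_powers, changes) where changes is the merge count
def pvPassA (coefs powers : List Int) : List Int × List Int × Int :=
  let n : Int := (powers.length : Int)
  let st := (PySem.List.pyRange 0 n 1).foldl
    (fun (st : List Int × List Int × List Int × Int) p1 =>
      let (sc, sp, ex, ch) := st
      if ex.contains p1 then st
      else
        let ist := (PySem.List.pyRange (p1 + 1) n 1).foldl
          (fun (ist : List Int × List Int × Int) p2 =>
            let (ex, dup, ch) := ist
            if PySem.List.pyGetD powers p1 0 = PySem.List.pyGetD powers p2 0 then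
              (ex ++ [p2], dup ++ [PySem.List.pyGetD coefs p2 0], ch + 1)
            else (ex, dup, ch))
          (ex, [PySem.List.pyGetD coefs p1 0], ch)
        let (ex', dup, ch') := ist
        (sc ++ [dup.sum], sp ++ [PySem.List.pyGetD powers p1 0], ex', ch'))
    ([], [], [], 1)
  (st.1, st.2.1, st.2.2.2 - 1)

-- A's `while changes != 0` loop; fuel only makes it total (proved sufficient below)
def pvLoopA : Nat → List Int → List Int → List Int × List Int
  | 0, _, _ => ([], [])
  | f + 1, coefs, powers =>
    let (sc, sp, ch) := pvPassA coefs powers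
    if ch = 0 then (sc, sp) else pvLoopA f sc sp

-- A's zero-deletion while loop (`del simp_coefs[c]; del simp_powers[c]`)
def pvDelZeros (sc sp : List Int) (c : Nat) : List Int × List Int :=
  if h : c < sc.length then
    if sc[c] = 0 then pvDelZeros (sc.eraseIdx c) (sp.eraseIdx c) c
    else pvDelZeros sc sp (c + 1)
  else (sc, sp)
termination_by sc.length - c
decreasing_by
  · simp [List.length_eraseIdx, h]; omega
  · omega

def poly_simplify (coefs : List Int) (powers : List Int) : List Int × List Int :=
  let lp := pvLoopA (powers.length + 1) coefs powers
  let dz := pvDelZeros lp.1 lp.2 0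
  if dz.1.length ≠ 0 then
    let srt := PySem.List.sorted2 (dz.2.zip dz.1) (fun x => x.1) (fun x => x.2) true
    (srt.map (fun x => x.2), srt.map (fun x => x.1))
  else (dz.1, dz.2)

-- ===== PORT B =====
def poly_simplify_alt (coefs : List Int) (powers : List Int) : List Int × List Int :=
  let agg := (coefs.zip powers).foldl
    (fun (d : PySem.Dict Int Int) cp => d.insert cp.2 (d.getD cp.2 0 + cp.1)) PySem.Dict.empty
  let items := agg.items.filter (fun pc => pc.2 ≠ 0)
  let srt := PySem.List.sorted2 items (fun x => x.1) (fun x => x.2) true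
  (srt.map (fun x => x.2), srt.map (fun x => x.1))

-- ===== PRECONDITION & SPEC =====
-- A indexes coefs at every position of powers, so it raises IndexError iff coefs is shorter
def Pre_poly_simplify (coefs : List Int) (powers : List Int) : Prop :=
  powers.length ≤ coefs.length
instance (coefs : List Int) (powers : List Int) : Decidable (Pre_poly_simplify coefs powers) := by
  unfold Pre_poly_simplify; infer_instance
def pvWitness_poly_simplify : List Int × List Int := ([1, 2, -1], [2, 1, 2])

def Spec_poly_simplify (coefs : List Int) (powers : List Int) (out : List Int × List Int) : Prop := out = poly_simplify_alt coefs powers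
instance (coefs : List Int) (powers : List Int) (out : List Int × List Int) : Decidable (Spec_poly_simplify coefs powers out) := by unfold Spec_poly_simplify; infer_instance

-- ===== CLAIM (what is proved, stated in full; the proofs are below) =====
def Claim_equal_poly_simplify : Prop := ∀ (coefs : List Int) (powers : List Int), Dom_poly_simplify coefs powers → Pre_poly_simplify coefs powers → Spec_poly_simplify coefs powers (poly_simplify coefs powers)
-- ===== LEMMAS AND PROOFS =====

-- the common combinatorial core: first-occurrence grouping of (coef, power) pairs into
-- (power, summed coef) pairs
def pvCombine : List (Int × Int) → List (Int × Int)
  | [] => []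
  | (c, p) :: rest =>
    (p, c + ((rest.filter (fun x => x.2 = p)).map (fun x => x.1)).sum)
      :: pvCombine (rest.filter (fun x => x.2 ≠ p))
termination_by l => l.length
decreasing_by
  simp only [List.length_unattach, List.length_cons]
  exact Nat.lt_succ_of_le (by simpa using List.length_filter_le _ rest.attach)


theorem pvCombine_ind (P : List (Int × Int) → Prop) (h0 : P [])
    (h1 : ∀ c p rest, P (rest.filter (fun x => x.2 ≠ p)) → P ((c, p) :: rest)) :
    ∀ l, P l := by
  intro l
  generalize hn : l.length = n
  induction n using Nat.strong_induction_on generalizing l with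
  | _ n ih =>
    match l with
    | [] => exact h0
    | (c, p) :: rest =>
      apply h1
      apply ih (rest.filter (fun x => x.2 ≠ p)).length _ _ rfl
      have := List.length_filter_le (fun x => decide (x.2 ≠ p)) rest
      simp only [List.length_cons] at hn
      omega

-- B's aggregation fold, fully generalized over the starting dict
theorem pv_agg_items (l : List (Int × Int)) (d : PySem.Dict Int Int) (hnd : d.keys.Nodup) :
    (l.foldl (fun (d : PySem.Dict Int Int) cp => d.insert cp.2 (d.getD cp.2 0 + cp.1)) d).items
      = d.items.map (fun kv => (kv.1, kv.2 + ((l.filter (fun x => x.2 = kv.1)).map (fun x => x.1)).sum))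
        ++ pvCombine (l.filter (fun x => x.2 ∉ d.keys)) := by
  induction l generalizing d with
  | nil => simp [pvCombine]
  | cons hd rest ih =>
    obtain ⟨c, p⟩ := hd
    simp only [List.foldl_cons]
    rw [ih (d.insert p (d.getD p 0 + c)) (PySem.Dict.nodup_keys_insert d p _ hnd)]
    by_cases hc : d.contains p = true
    · rw [PySem.Dict.items_insert_of_contains _ _ hc,
          PySem.Dict.keys_insert_of_contains _ _ hc]
      have hmap : (d.items.map (fun q => if q.1 == p then (p, d.getD p 0 + c) else q)).map
            (fun kv => (kv.1, kv.2 + ((rest.filter (fun x => x.2 = kv.1)).map (fun x => x.1)).sum))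
          = d.items.map (fun kv => (kv.1, kv.2 + ((((c, p) :: rest).filter (fun x => x.2 = kv.1)).map (fun x => x.1)).sum)) := by
        rw [List.map_map]
        apply List.map_congr_left
        intro kv hkv
        by_cases hkp : kv.1 = p
        · have hkv' : (p, kv.2) ∈ d.items := by
            rwa [show (p, kv.2) = kv by rw [← hkp]] 
          have hgd : d.getD p 0 = kv.2 := PySem.Dict.getD_of_mem_items _ hkv' hnd 0
          simp [Function.comp, hkp, hgd, List.filter_cons]
          ring
        · simp [Function.comp, hkp, List.filter_cons, Ne.symm hkp]
      rw [hmap]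
      have hfil : ((c, p) :: rest).filter (fun x => decide (x.2 ∉ d.keys)) = rest.filter (fun x => decide (x.2 ∉ d.keys)) := by
        rw [List.filter_cons]
        have : p ∈ d.keys := (PySem.Dict.contains_iff_mem_keys _ _).1 hc
        simp [this]
      rw [hfil]
    · have hnc : d.contains p = false := by simpa using hc
      have hpk : p ∉ d.keys := fun hm => absurd ((PySem.Dict.contains_iff_mem_keys d p).2 hm) hc
      rw [PySem.Dict.items_insert_of_not_contains _ _ hnc,
          PySem.Dict.keys_insert_of_not_contains _ _ hnc,
          PySem.Dict.getD_of_not_contains _ _ hnc]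
      rw [List.map_append, List.map_singleton]
      have hcomb : ((c, p) :: rest).filter (fun x => decide (x.2 ∉ d.keys))
          = (c, p) :: rest.filter (fun x => decide (x.2 ∉ d.keys)) := by
        rw [List.filter_cons]; simp [hpk]
      rw [hcomb, pvCombine]
      have hsum : (rest.filter (fun x => decide (x.2 ∉ d.keys))).filter (fun x => decide (x.2 = p))
          = rest.filter (fun x => decide (x.2 = p)) := by
        rw [List.filter_filter]
        apply List.filter_congr
        intro x hx
        by_cases hxp : x.2 = p
        · simp [hxp, hpk]
        · simp [hxp]
      have htail : (rest.filter (fun x => decide (x.2 ∉ d.keys))).filter (fun x => decide (x.2 ≠ p))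
          = rest.filter (fun x => decide (x.2 ∉ d.keys ++ [p])) := by
        rw [List.filter_filter]
        apply List.filter_congr
        intro x hx
        by_cases hxp : x.2 = p <;> by_cases hxk : x.2 ∈ d.keys <;> simp [hxp, hxk]
      have hmap2 : d.items.map (fun kv => (kv.1, kv.2 + ((rest.filter (fun x => x.2 = kv.1)).map (fun x => x.1)).sum))
          = d.items.map (fun kv => (kv.1, kv.2 + ((((c, p) :: rest).filter (fun x => x.2 = kv.1)).map (fun x => x.1)).sum)) := by
        apply List.map_congr_left
        intro kv hkv
        have : kv.1 ≠ p := by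
          intro hkp
          exact hpk (hkp ▸ PySem.Dict.mem_keys_of_mem_items _ hkv)
        simp [List.filter_cons, Ne.symm this]
      rw [hsum, htail, ← hmap2]
      simp [List.append_assoc]

-- A's inner scan over range(p1+1, n)
theorem pv_inner (coefs powers : List Int) (hlen : powers.length ≤ coefs.length)
    (k : Nat) (hk : k < powers.length) :
    ∀ (j : Nat), k < j → j ≤ powers.length →
    ∀ (ex dup : List Int) (ch : Int),
    (PySem.List.pyRange (j : Int) (powers.length : Int) 1).foldl
      (fun (ist : List Int × List Int × Int) p2 =>
        if PySem.List.pyGetD powers (k : Int) 0 = PySem.List.pyGetD powers p2 0 then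
          (ist.1 ++ [p2], ist.2.1 ++ [PySem.List.pyGetD coefs p2 0], ist.2.2 + 1)
        else (ist.1, ist.2.1, ist.2.2))
      (ex, dup, ch)
      = (ex ++ (PySem.List.pyRange (j : Int) (powers.length : Int) 1).filter
            (fun i => PySem.List.pyGetD powers (k : Int) 0 = PySem.List.pyGetD powers i 0),
         dup ++ (((coefs.zip powers).drop j).filter
            (fun x => x.2 = PySem.List.pyGetD powers (k : Int) 0)).map (fun x => x.1),
         ch + ((((coefs.zip powers).drop j).filter
            (fun x => x.2 = PySem.List.pyGetD powers (k : Int) 0)).length : Int)) := by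
  have hzlen : (coefs.zip powers).length = powers.length := by
    simp [List.length_zip, Nat.min_eq_right hlen]
  intro j
  generalize hm : powers.length - j = m
  induction m generalizing j with
  | zero =>
    intro hkj hjn ex dup ch
    have hj : j = powers.length := by omega
    subst hj
    rw [PySem.List.pyRange_one_eq_nil (le_refl _)]
    rw [List.drop_of_length_le (le_of_eq hzlen)]
    simp
  | succ m ih =>
    intro hkj hjn ex dup ch
    have hjlt : j < powers.length := by omega
    have hjc : j < coefs.length := lt_of_lt_of_le hjlt hlen
    have hget : PySem.List.pyGetD powers (j : Int) 0 = powers[j] := by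
      rw [PySem.List.pyGetD_natCast]
      exact List.getD_eq_getElem _ _ hjlt
    have hgetc : PySem.List.pyGetD coefs (j : Int) 0 = coefs[j] := by
      rw [PySem.List.pyGetD_natCast]
      exact List.getD_eq_getElem _ _ hjc
    have hjz : j < (coefs.zip powers).length := by omega
    have hdrop : (coefs.zip powers).drop j = (coefs[j], powers[j]) :: (coefs.zip powers).drop (j + 1) := by
      rw [List.drop_eq_getElem_cons hjz, List.getElem_zip]
    have hcons : PySem.List.pyRange (j : Int) (powers.length : Int) 1
        = (j : Int) :: PySem.List.pyRange ((j + 1 : Nat) : Int) (powers.length : Int) 1 := by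
      rw [PySem.List.pyRange_one_cons (by exact_mod_cast hjlt)]
      norm_num
    rw [hcons]
    simp only [List.foldl_cons, List.filter_cons, hdrop]
    have ih' := fun ex dup ch => ih (j + 1) (by omega) (by omega) (by omega) ex dup ch
    by_cases hpj : PySem.List.pyGetD powers (k : Int) 0 = PySem.List.pyGetD powers ((j : Int)) 0
    · rw [if_pos hpj]
      rw [ih']
      have hp2 : (decide ((coefs[j], powers[j]).2 = PySem.List.pyGetD powers (k : Int) 0)) = true := by
        simp [hget.symm ▸ hpj.symm, hget, hpj.symm]
      simp only [hp2, if_pos, decide_eq_true_eq, hpj, if_true, hget, hgetc]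
      rw [Prod.mk.injEq, Prod.mk.injEq]
      refine ⟨by simp [List.append_assoc], by simp, by simp only [List.length_cons]; push_cast; ring⟩
    · rw [if_neg hpj]
      rw [ih']
      have hp2 : (decide ((coefs[j], powers[j]).2 = PySem.List.pyGetD powers (k : Int) 0)) = false := by
        simp only [decide_eq_false_iff_not]
        intro hx
        exact hpj (by rw [hget]; exact hx.symm)
      simp only [hp2, decide_eq_true_eq, hpj, if_false, Bool.false_eq_true]

-- A's outer scan, with the excluded_indices invariant
theorem pv_outer (coefs powers : List Int) (hlen : powers.length ≤ coefs.length) :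
    ∀ (m k : Nat), powers.length - k = m → k ≤ powers.length →
    ∀ (sc sp ex : List Int) (ch : Int),
    (∀ i : Nat, k ≤ i → i < powers.length →
        (ex.contains (i : Int) = true ↔ PySem.List.pyGetD powers (i : Int) 0 ∈ sp)) →
    ∃ ex',
    (PySem.List.pyRange (k : Int) (powers.length : Int) 1).foldl
      (fun (st : List Int × List Int × List Int × Int) p1 =>
        if st.2.2.1.contains p1 = true then st
        else
          (st.1 ++ [(List.foldl
            (fun (ist : List Int × List Int × Int) p2 =>
              if PySem.List.pyGetD powers p1 0 = PySem.List.pyGetD powers p2 0 then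
                (ist.1 ++ [p2], ist.2.1 ++ [PySem.List.pyGetD coefs p2 0], ist.2.2 + 1)
              else (ist.1, ist.2.1, ist.2.2))
            (st.2.2.1, [PySem.List.pyGetD coefs p1 0], st.2.2.2)
            (PySem.List.pyRange (p1 + 1) (powers.length : Int) 1)).2.1.sum],
           st.2.1 ++ [PySem.List.pyGetD powers p1 0],
           (List.foldl
            (fun (ist : List Int × List Int × Int) p2 =>
              if PySem.List.pyGetD powers p1 0 = PySem.List.pyGetD powers p2 0 then
                (ist.1 ++ [p2], ist.2.1 ++ [PySem.List.pyGetD coefs p2 0], ist.2.2 + 1)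
              else (ist.1, ist.2.1, ist.2.2))
            (st.2.2.1, [PySem.List.pyGetD coefs p1 0], st.2.2.2)
            (PySem.List.pyRange (p1 + 1) (powers.length : Int) 1)).1,
           (List.foldl
            (fun (ist : List Int × List Int × Int) p2 =>
              if PySem.List.pyGetD powers p1 0 = PySem.List.pyGetD powers p2 0 then
                (ist.1 ++ [p2], ist.2.1 ++ [PySem.List.pyGetD coefs p2 0], ist.2.2 + 1)
              else (ist.1, ist.2.1, ist.2.2))
            (st.2.2.1, [PySem.List.pyGetD coefs p1 0], st.2.2.2)
            (PySem.List.pyRange (p1 + 1) (powers.length : Int) 1)).2.2))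
      (sc, sp, ex, ch)
      = (sc ++ (pvCombine (((coefs.zip powers).drop k).filter (fun x => x.2 ∉ sp))).map (fun x => x.2),
         sp ++ (pvCombine (((coefs.zip powers).drop k).filter (fun x => x.2 ∉ sp))).map (fun x => x.1),
         ex',
         ch + (((((coefs.zip powers).drop k).filter (fun x => x.2 ∉ sp)).length : Int)
               - ((pvCombine (((coefs.zip powers).drop k).filter (fun x => x.2 ∉ sp))).length : Int))) := by
  have hzlen : (coefs.zip powers).length = powers.length := by
    simp [List.length_zip, Nat.min_eq_right hlen]
  intro m
  induction m with
  | zero =>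
    intro k hm hkn sc sp ex ch hinv
    have hk : k = powers.length := by omega
    subst hk
    rw [PySem.List.pyRange_one_eq_nil (le_refl _)]
    rw [List.drop_of_length_le (le_of_eq hzlen)]
    exact ⟨ex, by simp [pvCombine]⟩
  | succ m ih =>
    intro k hm hkn sc sp ex ch hinv
    have hklt : k < powers.length := by omega
    have hkc : k < coefs.length := lt_of_lt_of_le hklt hlen
    have hget : PySem.List.pyGetD powers (k : Int) 0 = powers[k] := by
      rw [PySem.List.pyGetD_natCast]
      exact List.getD_eq_getElem _ _ hklt
    have hgetc : PySem.List.pyGetD coefs (k : Int) 0 = coefs[k] := by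
      rw [PySem.List.pyGetD_natCast]
      exact List.getD_eq_getElem _ _ hkc
    have hkz : k < (coefs.zip powers).length := by omega
    have hdrop : (coefs.zip powers).drop k = (coefs[k], powers[k]) :: (coefs.zip powers).drop (k + 1) := by
      rw [List.drop_eq_getElem_cons hkz, List.getElem_zip]
    have hcons : PySem.List.pyRange (k : Int) (powers.length : Int) 1
        = (k : Int) :: PySem.List.pyRange ((k + 1 : Nat) : Int) (powers.length : Int) 1 := by
      rw [PySem.List.pyRange_one_cons (by exact_mod_cast hklt)]
      norm_num
    rw [hcons]
    simp only [List.foldl_cons]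
    by_cases hmem : PySem.List.pyGetD powers (k : Int) 0 ∈ sp
    · have hct : ex.contains (k : Int) = true := (hinv k (le_refl _) hklt).2 hmem
      rw [if_pos hct]
      have hr : ((coefs.zip powers).drop k).filter (fun x => x.2 ∉ sp)
          = ((coefs.zip powers).drop (k + 1)).filter (fun x => x.2 ∉ sp) := by
        rw [hdrop, List.filter_cons]
        simp [hget ▸ hmem]
      rw [hr]
      exact ih (k + 1) (by omega) (by omega) sc sp ex ch
        (fun i h1 h2 => hinv i (by omega) h2)
    · have hcf : ¬(ex.contains (k : Int) = true) := fun h => hmem ((hinv k (le_refl _) hklt).1 h)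
      rw [if_neg hcf]
      have hInn := pv_inner coefs powers hlen k hklt (k + 1) (Nat.lt_succ_self _) (by omega)
        ex [PySem.List.pyGetD coefs (k : Int) 0] ch
      have hcast : ((k + 1 : Nat) : Int) = (k : Int) + 1 := by push_cast; ring
      rw [hcast] at hInn
      rw [hInn]
      dsimp only
      -- abbreviations
      set pk := PySem.List.pyGetD powers (k : Int) 0 with hpk
      set M := ((coefs.zip powers).drop (k + 1)).filter (fun x => x.2 = pk) with hM
      set I := (PySem.List.pyRange ((k : Int) + 1) (powers.length : Int) 1).filter
        (fun i => pk = PySem.List.pyGetD powers i 0) with hI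
      have hsum : ([PySem.List.pyGetD coefs (k : Int) 0] ++ M.map (fun x => x.1)).sum
          = PySem.List.pyGetD coefs (k : Int) 0 + (M.map (fun x => x.1)).sum := by
        simp
      -- new invariant
      have hinv' : ∀ i : Nat, k + 1 ≤ i → i < powers.length →
          ((ex ++ I).contains (i : Int) = true ↔ PySem.List.pyGetD powers (i : Int) 0 ∈ sp ++ [pk]) := by
        intro i h1 h2
        rw [List.contains_append]
        simp only [Bool.or_eq_true, List.mem_append, List.mem_singleton]
        constructor
        · rintro (h | h)
          · exact Or.inl ((hinv i (by omega) h2).1 h)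
          · right
            rw [hI, List.contains_eq_mem, decide_eq_true_eq] at h
            rw [List.mem_filter] at h
            exact (of_decide_eq_true h.2).symm
        · rintro (h | h)
          · exact Or.inl ((hinv i (by omega) h2).2 h)
          · right
            rw [hI, List.contains_eq_mem, decide_eq_true_eq, List.mem_filter]
            refine ⟨?_, by simp [h, List.getElem?_eq_getElem hklt]⟩
            rw [PySem.List.mem_pyRange_one]
            constructor <;> [exact_mod_cast h1; exact_mod_cast h2]
      obtain ⟨ex', hE⟩ := ih (k + 1) (by omega) (by omega)
        (sc ++ [([PySem.List.pyGetD coefs (k : Int) 0] ++ M.map (fun x => x.1)).sum])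
        (sp ++ [pk]) (ex ++ I) (ch + (M.length : Int)) hinv'
      refine ⟨ex', ?_⟩
      rw [hE]
      -- identify the combine pieces
      have hr : ((coefs.zip powers).drop k).filter (fun x => x.2 ∉ sp)
          = (coefs[k], powers[k]) :: ((coefs.zip powers).drop (k + 1)).filter (fun x => x.2 ∉ sp) := by
        rw [hdrop, List.filter_cons]
        have : powers[k] ∉ sp := hget ▸ hmem
        simp [this]
      have hMf : (((coefs.zip powers).drop (k + 1)).filter (fun x => x.2 ∉ sp)).filter
            (fun x => x.2 = powers[k]) = M := by
        rw [List.filter_filter, hM]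
        apply List.filter_congr
        intro x hx
        by_cases hxp : x.2 = powers[k]
        · simp [hxp, hget.symm, hmem, List.getElem?_eq_getElem hklt]
        · simp [hxp, hpk, hget, List.getElem?_eq_getElem hklt]
      have htail : (((coefs.zip powers).drop (k + 1)).filter (fun x => x.2 ∉ sp)).filter
            (fun x => x.2 ≠ powers[k])
          = ((coefs.zip powers).drop (k + 1)).filter (fun x => x.2 ∉ sp ++ [pk]) := by
        rw [List.filter_filter]
        apply List.filter_congr
        intro x hx
        by_cases hxp : x.2 = powers[k] <;> by_cases hxs : x.2 ∈ sp <;>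
          simp [hxp, hxs, hpk, hget, hmem, List.getElem?_eq_getElem hklt]
      rw [hr, pvCombine, hMf, htail]
      have hlenpart : (((coefs.zip powers).drop (k + 1)).filter (fun x => x.2 ∉ sp)).length
          = M.length + (((coefs.zip powers).drop (k + 1)).filter (fun x => x.2 ∉ sp ++ [pk])).length := by
        rw [← hMf, ← htail]
        have := List.length_eq_length_filter_add
          (l := ((coefs.zip powers).drop (k + 1)).filter (fun x => x.2 ∉ sp))
          (fun x => decide (x.2 = powers[k]))
        rw [this]
        congr 1
        apply congrArg List.length
        apply List.filter_congr
        intro x hx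
        by_cases hxp : x.2 = powers[k] <;> simp [hxp]
      rw [Prod.mk.injEq, Prod.mk.injEq]
      refine ⟨?_, ?_, ?_⟩
      · simp [List.append_assoc, hgetc, hget, List.getElem?_eq_getElem hklt]
      · simp [List.append_assoc, hpk, hget, List.getElem?_eq_getElem hklt]
      · simp only [List.length_cons]
        rw [hlenpart]
        push_cast
        ring

theorem pv_passA_eq (coefs powers : List Int) (hlen : powers.length ≤ coefs.length) :
    pvPassA coefs powers
      = ((pvCombine (coefs.zip powers)).map (fun x => x.2),
         (pvCombine (coefs.zip powers)).map (fun x => x.1),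
         (powers.length : Int) - ((pvCombine (coefs.zip powers)).length : Int)) := by
  have hzl : (coefs.zip powers).length = powers.length := by
    simp [List.length_zip, Nat.min_eq_right hlen]
  obtain ⟨ex', hE⟩ := pv_outer coefs powers hlen powers.length 0 (by omega) (by omega)
    [] [] [] 1 (fun i h1 h2 => by simp)
  simp only [List.drop_zero] at hE
  have hfilt : (coefs.zip powers).filter (fun x => decide (x.2 ∉ ([] : List Int)))
      = coefs.zip powers := List.filter_eq_self.2 (fun a _ => by simp)
  rw [hfilt] at hE
  have h1 := congrArg
    (fun t : List Int × List Int × List Int × Int => (t.1, t.2.1, t.2.2.2 - 1)) hE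
  have h2 : pvPassA coefs powers = _ := h1
  rw [h2]
  dsimp only
  rw [Prod.mk.injEq, Prod.mk.injEq]
  exact ⟨by simp, by simp, by rw [hzl]; ring⟩

theorem pv_combine_keys_sub (l : List (Int × Int)) :
    ∀ q ∈ (pvCombine l).map (fun x => x.1), q ∈ l.map (fun x => x.2) := by
  induction l using pvCombine_ind with
  | h0 => simp [pvCombine]
  | h1 c p rest ih =>
    intro q hq
    simp only [pvCombine, List.map_cons, List.mem_cons] at hq
    rcases hq with rfl | hq
    · simp
    · have := ih q hq
      simp only [List.mem_map] at this ⊢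
      obtain ⟨x, hx, rfl⟩ := this
      exact ⟨x, List.mem_cons_of_mem _ (List.mem_of_mem_filter hx), rfl⟩

theorem pv_combine_keys_nodup (l : List (Int × Int)) :
    ((pvCombine l).map (fun x => x.1)).Nodup := by
  induction l using pvCombine_ind with
  | h0 => simp [pvCombine]
  | h1 c p rest ih =>
    simp only [pvCombine, List.map_cons, List.nodup_cons]
    refine ⟨fun hp => ?_, ih⟩
    have := pv_combine_keys_sub _ _ hp
    simp only [List.mem_map, List.mem_filter] at this
    obtain ⟨x, ⟨_, hx⟩, rfl⟩ := this
    simp at hx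

theorem pv_combine_len_le (l : List (Int × Int)) :
    (pvCombine l).length ≤ l.length := by
  induction l using pvCombine_ind with
  | h0 => simp [pvCombine]
  | h1 c p rest ih =>
    simp only [pvCombine, List.length_cons]
    have := List.length_filter_le (fun x => decide (x.2 ≠ p)) rest
    omega

theorem pv_combine_id (l : List (Int × Int)) (h : (l.map (fun x => x.2)).Nodup) :
    pvCombine l = l.map (fun x => (x.2, x.1)) := by
  induction l using pvCombine_ind with
  | h0 => simp [pvCombine]
  | h1 c p rest ih =>
    simp only [List.map_cons, List.nodup_cons, List.mem_map] at h
    obtain ⟨hp, hrest⟩ := h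
    have hne : rest.filter (fun x => x.2 ≠ p) = rest := by
      apply List.filter_eq_self.2
      intro x hx
      simp only [decide_eq_true_eq]
      exact fun hxp => hp ⟨x, hx, hxp⟩
    have heq : rest.filter (fun x => x.2 = p) = [] := by
      apply List.filter_eq_nil_iff.2
      intro x hx
      simp only [decide_eq_true_eq]
      exact fun hxp => hp ⟨x, hx, hxp⟩
    rw [hne] at ih
    simp only [pvCombine, heq, hne, List.map_nil, List.sum_nil, add_zero, List.map_cons]
    exact congrArg _ (ih hrest)

theorem pv_loopA_eq (coefs powers : List Int) (hlen : powers.length ≤ coefs.length) :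
    pvLoopA (powers.length + 1) coefs powers
      = ((pvCombine (coefs.zip powers)).map (fun x => x.2),
         (pvCombine (coefs.zip powers)).map (fun x => x.1)) := by
  have hzlen : (coefs.zip powers).length = powers.length := by
    simp [List.length_zip, Nat.min_eq_right hlen]
  have hCP : ((pvCombine (coefs.zip powers)).map (fun x => x.2)).zip
        ((pvCombine (coefs.zip powers)).map (fun x => x.1))
      = (pvCombine (coefs.zip powers)).map (fun x => (x.2, x.1)) := List.zip_map'
  have hlen' : ((pvCombine (coefs.zip powers)).map (fun x => x.1)).length
      ≤ ((pvCombine (coefs.zip powers)).map (fun x => x.2)).length := by simp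
  have hid : pvCombine (((pvCombine (coefs.zip powers)).map (fun x => x.2)).zip
        ((pvCombine (coefs.zip powers)).map (fun x => x.1)))
      = pvCombine (coefs.zip powers) := by
    rw [hCP, pv_combine_id]
    · rw [List.map_map]
      have : ((fun x : Int × Int => (x.2, x.1)) ∘ (fun x : Int × Int => (x.2, x.1)))
          = fun x : Int × Int => (x.1, x.2) := by funext x; rfl
      rw [this]
      have : (fun x : Int × Int => (x.1, x.2)) = id := by funext x; exact Prod.mk.eta
      rw [this, List.map_id]
    · rw [List.map_map]
      have : ((fun x : Int × Int => x.2) ∘ (fun x : Int × Int => (x.2, x.1)))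
          = fun x : Int × Int => x.1 := by funext x; rfl
      rw [this]
      exact pv_combine_keys_nodup _
  rw [pvLoopA]
  rw [pv_passA_eq coefs powers hlen]
  dsimp only
  by_cases hch : (powers.length : Int) - ((pvCombine (coefs.zip powers)).length : Int) = 0
  · rw [if_pos hch]
  · rw [if_neg hch]
    have hle := pv_combine_len_le (coefs.zip powers)
    have hlt : (pvCombine (coefs.zip powers)).length < powers.length := by
      rw [hzlen] at hle
      rcases Nat.lt_or_ge (pvCombine (coefs.zip powers)).length powers.length with h | h
      · exact h
      · exact absurd (by omega : (powers.length : Int) - ((pvCombine (coefs.zip powers)).length : Int) = 0) hch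
    obtain ⟨m, hm⟩ : ∃ m, powers.length = m + 1 := ⟨powers.length - 1, by omega⟩
    rw [hm, pvLoopA]
    rw [pv_passA_eq _ _ hlen']
    dsimp only
    rw [hid]
    have hchz : (((pvCombine (coefs.zip powers)).map (fun x : Int × Int => x.1)).length : Int)
        - ((pvCombine (coefs.zip powers)).length : Int) = 0 := by simp
    rw [if_pos hchz]

theorem pv_take_eraseIdx (l : List Int) (c : Nat) (h : c < l.length) :
    (l.eraseIdx c).take c = l.take c := by
  rw [List.eraseIdx_eq_take_drop_succ]
  rw [List.take_append]
  simp [List.length_take, Nat.min_eq_left h.le, List.take_take]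

theorem pv_drop_eraseIdx (l : List Int) (c : Nat) (h : c < l.length) :
    (l.eraseIdx c).drop c = l.drop (c + 1) := by
  rw [List.eraseIdx_eq_take_drop_succ]
  rw [List.drop_left' (by simp [List.length_take, Nat.min_eq_left h.le])]

theorem pv_delZeros_eq (sc sp : List Int) (c : Nat) :
    sc.length = sp.length →
    pvDelZeros sc sp c
      = (sc.take c ++ (((sc.drop c).zip (sp.drop c)).filter (fun x => x.1 ≠ 0)).map (fun x => x.1),
         sp.take c ++ (((sc.drop c).zip (sp.drop c)).filter (fun x => x.1 ≠ 0)).map (fun x => x.2)) := by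
  induction sc, sp, c using pvDelZeros.induct with
  | case1 sc sp c h h0 ih =>
    intro hlen
    have hc' : c < sp.length := hlen ▸ h
    have hlen' : (sc.eraseIdx c).length = (sp.eraseIdx c).length := by
      simp [List.length_eraseIdx, h, hc', hlen]
    rw [pvDelZeros]
    simp only [h, dite_true, h0, if_true, dif_pos, if_pos]
    rw [ih hlen']
    rw [pv_take_eraseIdx sc c h, pv_take_eraseIdx sp c hc',
        pv_drop_eraseIdx sc c h, pv_drop_eraseIdx sp c hc']
    have hd1 : sc.drop c = sc[c] :: sc.drop (c + 1) := List.drop_eq_getElem_cons h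
    have hd2 : sp.drop c = sp[c] :: sp.drop (c + 1) := List.drop_eq_getElem_cons hc'
    rw [hd1, hd2, List.zip_cons_cons, List.filter_cons]
    simp [h0]
  | case2 sc sp c h h0 ih =>
    intro hlen
    have hc' : c < sp.length := hlen ▸ h
    rw [pvDelZeros]
    simp only [h, dite_true, h0, if_false, dif_pos, if_neg]
    rw [ih hlen]
    have hd1 : sc.drop c = sc[c] :: sc.drop (c + 1) := List.drop_eq_getElem_cons h
    have hd2 : sp.drop c = sp[c] :: sp.drop (c + 1) := List.drop_eq_getElem_cons hc'
    rw [hd1, hd2, List.zip_cons_cons, List.filter_cons]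
    have h1 : sc.take (c + 1) = sc.take c ++ [sc[c]] := by
      rw [List.take_add_one]; simp [List.getElem?_eq_getElem h]
    have h2 : sp.take (c + 1) = sp.take c ++ [sp[c]] := by
      rw [List.take_add_one]; simp [List.getElem?_eq_getElem hc']
    simp only [h0, not_false_iff, decide_not, decide_eq_true_eq, if_pos, Prod.mk.injEq]
    simp [h0]
    constructor
    · rw [h1, List.append_assoc]; rfl
    · rw [h2, List.append_assoc]; rfl
  | case3 sc sp c h =>
    intro hlen
    have hc : sc.length ≤ c := Nat.le_of_not_lt h
    rw [pvDelZeros]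
    simp [h, List.take_of_length_le hc, List.take_of_length_le (hlen ▸ hc),
          List.drop_of_length_le hc]

-- ===== VERDICT (by name: the statement is the Claim_ definition above) =====
theorem poly_simplify_spec : Claim_equal_poly_simplify := by
  intro coefs powers _ hpre
  unfold Pre_poly_simplify at hpre
  unfold Spec_poly_simplify
  -- abbreviations
  set comb := pvCombine (coefs.zip powers) with hcomb
  set filtered := comb.filter (fun x => x.2 ≠ 0) with hfiltered
  -- A side
  simp only [poly_simplify]
  rw [pv_loopA_eq coefs powers hpre]
  dsimp only
  rw [pv_delZeros_eq _ _ 0 (by simp)]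
  simp only [List.take_zero, List.drop_zero, List.nil_append]
  have hCP : (comb.map (fun x => x.2)).zip (comb.map (fun x => x.1))
      = comb.map (fun x => (x.2, x.1)) := List.zip_map'
  rw [hCP, List.filter_map]
  have hpred : ((fun x : Int × Int => decide (x.1 ≠ 0)) ∘ (fun x : Int × Int => (x.2, x.1)))
      = (fun x : Int × Int => decide (x.2 ≠ 0)) := by funext x; rfl
  rw [hpred, ← hfiltered]
  rw [List.map_map, List.map_map]
  have hc1 : ((fun x : Int × Int => x.1) ∘ (fun x : Int × Int => (x.2, x.1)))
      = (fun x : Int × Int => x.2) := by funext x; rfl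
  have hc2 : ((fun x : Int × Int => x.2) ∘ (fun x : Int × Int => (x.2, x.1)))
      = (fun x : Int × Int => x.1) := by funext x; rfl
  rw [hc1, hc2]
  -- B side
  simp only [poly_simplify_alt]
  rw [pv_agg_items (coefs.zip powers) PySem.Dict.empty (by simp [PySem.Dict.nodup_keys_empty])]
  have hempty : (PySem.Dict.empty : PySem.Dict Int Int).items = [] := rfl
  have hkempty : (PySem.Dict.empty : PySem.Dict Int Int).keys = [] := rfl
  rw [hempty, hkempty]
  have hfilt2 : (coefs.zip powers).filter (fun x => decide (x.2 ∉ ([] : List Int)))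
      = coefs.zip powers := List.filter_eq_self.2 (fun a _ => by simp)
  rw [hfilt2]
  simp only [List.map_nil, List.nil_append, ← hcomb, ← hfiltered]
  -- compare
  have hzipF : (filtered.map (fun x => x.1)).zip (filtered.map (fun x => x.2)) = filtered := by
    rw [List.zip_map']
    have : (fun x : Int × Int => (x.1, x.2)) = id := by funext x; exact Prod.mk.eta
    rw [this, List.map_id]
  by_cases hnil : filtered = []
  · rw [hnil]
    simp [PySem.List.sorted2]
  · have hlenne : (filtered.map (fun x : Int × Int => x.2)).length ≠ 0 := by
      simp [List.length_eq_zero_iff, hnil]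
    rw [if_pos hlenne, hzipF]
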